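-- pv_equiv track=rewrite | github.com/GrecAndrei/sun60iw2-upstream | generators/plugins/pinmux_extractor.py | _apply_name_map
-- ===== SOURCE A (Python) =====
-- VENDOR_NAME_MAP = {
--     "twi": "i2c",
--     "sdc": "mmc",
--     "spif": "spi",
--     "ndfc": "nand",
--     "dpss": "lcd0",
--     "sd": "mmc",  # sd0 -> mmc0, sd2 -> mmc2
-- }
--
-- def _apply_name_map(name: str) -> str:
--     """Translate vendor function names to mainline equivalents."""
--     # Skip commented-out vendor names (e.g. //owa)
--     if name.startswith("//"):
--         return ""
--
--     # Direct prefix replacement: twi0 -> i2c0, sdc2 -> mmc2, etc.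
--     for vendor, mainline in sorted(VENDOR_NAME_MAP.items(), key=lambda x: -len(x[0])):
--         if name.startswith(vendor):
--             # Check if next char is a digit (to avoid matching 'twi' inside 'twilight')
--             remainder = name[len(vendor) :]
--             if remainder == "" or remainder[0].isdigit():
--                 return mainline + remainder
--     return name
-- ===== SOURCE B (Python) =====
-- VENDOR_NAME_MAP = {
--     "twi": "i2c",
--     "sdc": "mmc",
--     "spif": "spi",
--     "ndfc": "nand",
--     "dpss": "lcd0",
--     "sd": "mmc",  # sd0 -> mmc0, sd2 -> mmc2
-- }
--
-- def _apply_name_map(name: str) -> str: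
--     """Translate vendor function names to mainline equivalents."""
--     if name.startswith("//"):
--         return ""
--     # Split at the first digit: prefix has no digits, suffix starts with one (or is empty).
--     i = 0
--     while i < len(name) and not name[i].isdigit():
--         i += 1
--     mainline = VENDOR_NAME_MAP.get(name[:i])
--     if mainline is not None:
--         return mainline + name[i:]
--     return name
-- ===== Notes on version B (the rewrite author's own statement) =====
-- stated objective: simpler
-- what changed: B drops A's per-call sort of the vendor map and the candidate-prefix loop with repeated startswith scans, splitting the name once at its first digit and doing a single dict lookup on the digit-free prefix.
import Mathlib
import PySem

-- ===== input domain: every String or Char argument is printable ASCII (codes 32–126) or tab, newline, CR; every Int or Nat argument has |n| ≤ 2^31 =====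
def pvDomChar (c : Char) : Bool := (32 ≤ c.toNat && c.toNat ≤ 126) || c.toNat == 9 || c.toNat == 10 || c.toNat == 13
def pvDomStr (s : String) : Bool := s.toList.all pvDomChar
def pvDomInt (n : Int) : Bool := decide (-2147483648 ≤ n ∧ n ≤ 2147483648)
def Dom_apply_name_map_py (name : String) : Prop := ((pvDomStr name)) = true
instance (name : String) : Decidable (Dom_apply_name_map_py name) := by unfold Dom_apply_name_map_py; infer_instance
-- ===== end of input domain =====

-- B replaces A's per-call sort and candidate-prefix loop by one split at the first digit
-- plus a single dict lookup (objective: simpler).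


-- ===== PORT A =====
-- module constant VENDOR_NAME_MAP, as read by A
def pvVendorNameMapA : PySem.Dict String String :=
  PySem.Dict.ofList [("twi", "i2c"), ("sdc", "mmc"), ("spif", "spi"),
                     ("ndfc", "nand"), ("dpss", "lcd0"), ("sd", "mmc")]

-- A's 'for vendor, mainline in sorted(...)' loop, with its early returns
def pvApplyLoopA (name : String) : List (String × String) → String
  | [] => name
  | (vendor, mainline) :: rest =>
    if PySem.Str.startswith name vendor then
      let remainder := PySem.Str.slice name (some (PySem.Str.len vendor)) none
      if remainder = "" ∨ (PySem.Str.pyGet? remainder 0).any PySem.Chars.isdigit = true then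
        String.ofList (mainline.toList ++ remainder.toList)
      else pvApplyLoopA name rest
    else pvApplyLoopA name rest

def apply_name_map_py (name : String) : String :=
  if PySem.Str.startswith name "//" then ""
  else pvApplyLoopA name
    (PySem.List.sorted pvVendorNameMapA.items (fun x => -(PySem.Str.len x.1)))

-- ===== PORT B =====
-- module constant VENDOR_NAME_MAP, B's copy
def pvVendorNameMapB : PySem.Dict String String :=
  PySem.Dict.ofList [("twi", "i2c"), ("sdc", "mmc"), ("spif", "spi"),
                     ("ndfc", "nand"), ("dpss", "lcd0"), ("sd", "mmc")]

-- B's 'while i < len(name) and not name[i].isdigit(): i += 1' scan for the first digit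
def pvFirstDigitIdx : List Char → Nat
  | [] => 0
  | c :: cs => if PySem.Chars.isdigit c then 0 else pvFirstDigitIdx cs + 1

def apply_name_map_py_alt (name : String) : String :=
  if PySem.Str.startswith name "//" then ""
  else
    let cs := name.toList
    let i := pvFirstDigitIdx cs
    match PySem.Dict.get? pvVendorNameMapB (String.ofList (cs.take i)) with
    | some mainline => String.ofList (mainline.toList ++ cs.drop i)
    | none => name

-- ===== PRECONDITION & SPEC =====
def Spec_apply_name_map_py (name : String) (out : String) : Prop := out = apply_name_map_py_alt name
instance (name : String) (out : String) : Decidable (Spec_apply_name_map_py name out) := by unfold Spec_apply_name_map_py; infer_instance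

-- ===== CLAIM (what is proved, stated in full; the proofs are below) =====
def Claim_equal_apply_name_map_py : Prop := ∀ (name : String), Dom_apply_name_map_py name → Spec_apply_name_map_py name (apply_name_map_py name)

-- ===== LEMMAS AND PROOFS =====

-- the predicate B scans with: "not a digit"
def pvND (c : Char) : Bool := !PySem.Chars.isdigit c

lemma pvTakeWhile_append (v u : List Char) (h : v.all pvND) :
    (v ++ u).takeWhile pvND = v ++ u.takeWhile pvND := by
  have hv : v.takeWhile pvND = v :=
    List.takeWhile_eq_self_iff.2 (by simpa [List.all_eq_true] using h)
  rw [List.takeWhile_append]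
  simp [hv]

lemma pvDrop_takeWhile_length (cs : List Char) :
    cs.drop (cs.takeWhile pvND).length = cs.dropWhile pvND := by
  have h : List.drop (List.takeWhile pvND cs).length
      (List.takeWhile pvND cs ++ List.dropWhile pvND cs) = List.dropWhile pvND cs :=
    List.drop_left
  rwa [List.takeWhile_append_dropWhile] at h

lemma pvTake_takeWhile_length (cs : List Char) :
    cs.take (cs.takeWhile pvND).length = cs.takeWhile pvND := by
  have h : List.take (List.takeWhile pvND cs).length
      (List.takeWhile pvND cs ++ List.dropWhile pvND cs) = List.takeWhile pvND cs :=
    List.take_left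
  rwa [List.takeWhile_append_dropWhile] at h

lemma pvFirstDigitIdx_eq (cs : List Char) :
    pvFirstDigitIdx cs = (cs.takeWhile pvND).length := by
  induction cs with
  | nil => rfl
  | cons c cs ih =>
    by_cases h : PySem.Chars.isdigit c
    · simp [pvFirstDigitIdx, List.takeWhile, pvND, h]
    · simp [pvFirstDigitIdx, List.takeWhile, pvND, h, ih]

lemma pvSliceDrop (s v : String) :
    (PySem.Str.slice s (some (PySem.Str.len v)) none).toList = s.toList.drop v.toList.length := by
  rw [PySem.Str.len_eq]
  simp only [PySem.Str.slice, String.toList_ofList, PySem.Chars.slice_eq_listSlice]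
  rw [PySem.List.slice_from_natCast]

lemma pvPyGet0 (s : String) : PySem.Str.pyGet? s 0 = s.toList.head? := by
  simp [PySem.Str.pyGet?_eq, PySem.List.pyGet?_zero, List.head?_eq_getElem?]

-- A's per-vendor match condition holds iff the vendor is exactly the digit-free
-- prefix that B splits off.
lemma pvCond_iff (cs v : List Char) (hv : v.all pvND) :
    (v <+: cs ∧ (cs.drop v.length = [] ∨ (cs.drop v.length).head?.any PySem.Chars.isdigit = true))
    ↔ cs.takeWhile pvND = v := by
  constructor
  · rintro ⟨⟨u, rfl⟩, hrest⟩
    rw [List.drop_left] at hrest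
    rw [pvTakeWhile_append v u hv]
    rcases hrest with h | h
    · simp [h]
    · rcases u with _ | ⟨c, r⟩
      · simp at h
      · simp only [List.head?_cons, Option.any_some] at h
        simp [List.takeWhile, pvND, h]
  · intro h
    refine ⟨h ▸ List.takeWhile_prefix pvND, ?_⟩
    rw [← h, pvDrop_takeWhile_length]
    rcases he : cs.dropWhile pvND with _ | ⟨c, r⟩
    · exact Or.inl rfl
    · refine Or.inr ?_
      have hc := List.head_dropWhile_not pvND (l := cs) (by simp [he])
      simp only [he, List.head_cons] at hc
      simp only [pvND, Bool.not_eq_false'] at hc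
      simp [hc]

-- one step of A's loop, for a digit-free vendor, reduced to B's split
set_option maxHeartbeats 1000000 in
lemma pvLoopA_cons (name v m : String) (rest : List (String × String))
    (hv : v.toList.all pvND) :
    pvApplyLoopA name ((v, m) :: rest) =
      if name.toList.takeWhile pvND = v.toList then
        String.ofList (m.toList ++ name.toList.dropWhile pvND)
      else pvApplyLoopA name rest := by
  simp only [pvApplyLoopA]
  by_cases hsw : PySem.Str.startswith name v = true
  · have hpre : v.toList <+: name.toList := by
      rw [PySem.Str.startswith_eq] at hsw
      exact (PySem.Chars.startswith_iff _ _).1 hsw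
    rw [hsw]
    simp only [if_true]
    have hrl := pvSliceDrop name v
    by_cases hc : name.toList.takeWhile pvND = v.toList
    · obtain ⟨-, hrest⟩ := (pvCond_iff name.toList v.toList hv).2 hc
      have hcond : PySem.Str.slice name (some (PySem.Str.len v)) none = "" ∨
          (PySem.Str.pyGet? (PySem.Str.slice name (some (PySem.Str.len v)) none) 0).any
            PySem.Chars.isdigit = true := by
        rcases hrest with h | h
        · exact Or.inl (String.toList_eq_nil_iff.1 (by rw [hrl]; exact h))
        · exact Or.inr (by rw [pvPyGet0, hrl]; exact h)
      rw [if_pos hc, if_pos hcond]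
      congr 1
      rw [hrl, ← hc, pvDrop_takeWhile_length]
    · have hncond : ¬ (PySem.Str.slice name (some (PySem.Str.len v)) none = "" ∨
          (PySem.Str.pyGet? (PySem.Str.slice name (some (PySem.Str.len v)) none) 0).any
            PySem.Chars.isdigit = true) := by
        intro hcond
        apply hc
        apply (pvCond_iff name.toList v.toList hv).1
        refine ⟨hpre, ?_⟩
        rcases hcond with h | h
        · exact Or.inl (by rw [← hrl, h]; rfl)
        · exact Or.inr (by rw [← hrl, ← pvPyGet0]; exact h)
      rw [if_neg hc, if_neg hncond]
  · have hc : ¬ name.toList.takeWhile pvND = v.toList := by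
      intro hc
      apply hsw
      rw [PySem.Str.startswith_eq]
      exact (PySem.Chars.startswith_iff _ _).2
        ((pvCond_iff name.toList v.toList hv).2 hc).1
    simp only [Bool.not_eq_true] at hsw
    rw [hsw, if_neg hc]
    simp

-- the concrete result of A's per-call sort (stable, by descending key length)
lemma pvSortedEval :
    PySem.List.sorted pvVendorNameMapA.items (fun x => -(PySem.Str.len x.1)) =
      [("spif", "spi"), ("ndfc", "nand"), ("dpss", "lcd0"),
       ("twi", "i2c"), ("sdc", "mmc"), ("sd", "mmc")] := by
  decide

lemma pvGetNone (t : List Char)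
    (h1 : t ≠ "twi".toList) (h2 : t ≠ "sdc".toList) (h3 : t ≠ "spif".toList)
    (h4 : t ≠ "ndfc".toList) (h5 : t ≠ "dpss".toList) (h6 : t ≠ "sd".toList) :
    PySem.Dict.get? pvVendorNameMapB (String.ofList t) = none := by
  have hne : ∀ (k : String), k.toList ≠ t → (k == String.ofList t) = false := by
    intro k hk
    rw [beq_eq_false_iff_ne]
    intro he
    exact hk (by rw [he, String.toList_ofList])
  have hmk : pvVendorNameMapB = PySem.Dict.mk
      [("twi", "i2c"), ("sdc", "mmc"), ("spif", "spi"),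
       ("ndfc", "nand"), ("dpss", "lcd0"), ("sd", "mmc")] := by decide
  rw [hmk]
  rw [PySem.Dict.get?_mk_cons, PySem.Dict.get?_mk_cons, PySem.Dict.get?_mk_cons,
      PySem.Dict.get?_mk_cons, PySem.Dict.get?_mk_cons, PySem.Dict.get?_mk_cons]
  rw [hne _ (fun h => h1 h.symm), hne _ (fun h => h2 h.symm), hne _ (fun h => h3 h.symm),
      hne _ (fun h => h4 h.symm), hne _ (fun h => h5 h.symm), hne _ (fun h => h6 h.symm)]
  simp [PySem.Dict.get?]

lemma pvGetSome (t : List Char) (k m : String)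
    (hk : t = k.toList)
    (hget : PySem.Dict.get? pvVendorNameMapB k = some m) :
    PySem.Dict.get? pvVendorNameMapB (String.ofList t) = some m := by
  have : String.ofList t = k := by
    rw [← String.toList_inj, String.toList_ofList, hk]
  rw [this, hget]

-- ===== VERDICT (by name: the statement is the Claim_ definition above) =====
theorem apply_name_map_py_spec : Claim_equal_apply_name_map_py := by
  intro name _
  unfold Spec_apply_name_map_py apply_name_map_py apply_name_map_py_alt
  by_cases hsw : PySem.Str.startswith name "//" = true
  · rw [hsw]
    rfl
  · simp only [Bool.not_eq_true] at hsw
    rw [hsw]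
    simp only [Bool.false_eq_true, if_false]
    rw [pvSortedEval]
    rw [pvLoopA_cons _ _ _ _ (by decide), pvLoopA_cons _ _ _ _ (by decide),
        pvLoopA_cons _ _ _ _ (by decide), pvLoopA_cons _ _ _ _ (by decide),
        pvLoopA_cons _ _ _ _ (by decide), pvLoopA_cons _ _ _ _ (by decide)]
    rw [pvFirstDigitIdx_eq, pvTake_takeWhile_length, pvDrop_takeWhile_length]
    set t := name.toList.takeWhile pvND with ht
    by_cases h3 : t = "spif".toList
    · rw [if_pos h3, pvGetSome t "spif" "spi" h3 (by decide)]
    · rw [if_neg h3]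
      by_cases h4 : t = "ndfc".toList
      · rw [if_pos h4, pvGetSome t "ndfc" "nand" h4 (by decide)]
      · rw [if_neg h4]
        by_cases h5 : t = "dpss".toList
        · rw [if_pos h5, pvGetSome t "dpss" "lcd0" h5 (by decide)]
        · rw [if_neg h5]
          by_cases h1 : t = "twi".toList
          · rw [if_pos h1, pvGetSome t "twi" "i2c" h1 (by decide)]
          · rw [if_neg h1]
            by_cases h2 : t = "sdc".toList
            · rw [if_pos h2, pvGetSome t "sdc" "mmc" h2 (by decide)]
            · rw [if_neg h2]
              by_cases h6 : t = "sd".toList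
              · rw [if_pos h6, pvGetSome t "sd" "mmc" h6 (by decide)]
              · rw [if_neg h6, pvGetNone t h1 h2 h3 h4 h5 h6]
                rfl
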